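-- pv_equiv track=rewrite | github.com/boku13/cses | 3.py | getSubSeq
-- ===== SOURCE A (Python) =====
-- def getSubSeq(s, n):
--     res = ""
--     cr = 0
--     while (cr < n):
--
--         mx = s[cr]
--         for i in range(cr + 1, n):
--             mx = max(mx, s[i])
--         lst = cr
--
--         for i in range(cr,n):
--             if (s[i] == mx):
--                 res += s[i]
--                 lst = i
--
--         cr = lst + 1
--
--     return res
-- ===== SOURCE B (Python) =====
-- def getSubSeq(s, n):
--     # One backward pass: keep a char iff it is >= every char after it (within s[:n]).
--     out = []
--     best = None
--     for c in reversed(s[:max(n, 0)]):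
--         if best is None or c >= best:
--             out.append(c)
--             best = c
--     return "".join(reversed(out))
-- ===== Notes on version B (the rewrite author's own statement) =====
-- stated objective: faster
-- what changed: replaced the quadratic restart loop (rescanning the suffix for its max and its occurrences each round) with a single backward pass that keeps a character iff it is >= the running maximum of everything after it
import Mathlib
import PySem

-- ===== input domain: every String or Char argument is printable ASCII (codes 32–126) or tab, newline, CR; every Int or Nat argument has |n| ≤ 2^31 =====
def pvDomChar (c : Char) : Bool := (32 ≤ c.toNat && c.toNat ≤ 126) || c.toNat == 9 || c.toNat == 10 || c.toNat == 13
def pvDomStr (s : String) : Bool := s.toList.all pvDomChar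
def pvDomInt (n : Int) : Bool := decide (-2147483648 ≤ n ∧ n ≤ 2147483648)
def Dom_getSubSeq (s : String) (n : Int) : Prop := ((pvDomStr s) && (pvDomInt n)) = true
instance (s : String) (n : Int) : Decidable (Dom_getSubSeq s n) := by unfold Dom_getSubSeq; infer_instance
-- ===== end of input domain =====

-- B replaces A's quadratic restart loop by a single O(n) backward pass keeping each char that is ≥ the running max of the chars after it.

-- ===== PORT A =====
-- mx = s[cr]; for i in range(cr+1, n): mx = max(mx, s[i])
def aMx (l : List Char) (n cr : Int) : Char :=
  (PySem.List.pyRange (cr + 1) n 1).foldl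
    (fun mx i => max mx (PySem.List.pyGetD l i ' ')) (PySem.List.pyGetD l cr ' ')

-- body of: for i in range(cr, n): if s[i] == mx: res += s[i]; lst = i
def aInner (l : List Char) (mx : Char) (st : List Char × Int) (i : Int) : List Char × Int :=
  if PySem.List.pyGetD l i ' ' == mx then (st.1 ++ [PySem.List.pyGetD l i ' '], i) else st

-- the while loop; fuel (n.toNat + 1) always suffices since cr strictly increases each round
def aLoop (l : List Char) (n : Int) : Nat → Int → List Char → List Char
  | 0, _, res => res
  | fuel + 1, cr, res =>
    if cr < n then
      let mx := aMx l n cr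
      let p := (PySem.List.pyRange cr n 1).foldl (aInner l mx) (res, cr)
      aLoop l n fuel (p.2 + 1) p.1
    else res

def getSubSeq (s : String) (n : Int) : String :=
  String.ofList (aLoop s.toList n (n.toNat + 1) 0 [])

-- ===== PORT B =====
def getSubSeq_alt (s : String) (n : Int) : String :=
  let pref := PySem.List.slice s.toList none (some (max n 0))
  let st := pref.reverse.foldl
    (fun (st : List Char × Option Char) c =>
      if st.2.all (fun b => b ≤ c) then (st.1 ++ [c], some c) else st)
    ([], none)
  String.ofList st.1.reverse

-- ===== PRECONDITION & SPEC =====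
-- A indexes s[i] for i up to n-1, so it raises IndexError whenever n > len(s); Pre_ excludes exactly those inputs.
def Pre_getSubSeq (s : String) (n : Int) : Prop := n ≤ (s.toList.length : Int)
instance (s : String) (n : Int) : Decidable (Pre_getSubSeq s n) := by unfold Pre_getSubSeq; infer_instance
def pvWitness_getSubSeq : String × Int := ("cabcba", 5)

def Spec_getSubSeq (s : String) (n : Int) (out : String) : Prop := out = getSubSeq_alt s n
instance (s : String) (n : Int) (out : String) : Decidable (Spec_getSubSeq s n out) := by unfold Spec_getSubSeq; infer_instance

-- ===== CLAIM (what is proved, stated in full; the proofs are below) =====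
def Claim_equal_getSubSeq : Prop := ∀ (s : String) (n : Int), Dom_getSubSeq s n → Pre_getSubSeq s n → Spec_getSubSeq s n (getSubSeq s n)

-- ===== LEMMAS AND PROOFS =====

-- maximum of a list, computed from the right (none on [])
def sufMax : List Char → Option Char
  | [] => none
  | c :: w =>
    match sufMax w with
    | none => some c
    | some b => some (max c b)

-- the common reference: keep c iff c ≥ max of everything after it
def ref : List Char → List Char
  | [] => []
  | c :: w => if (sufMax w).all (fun b => b ≤ c) then c :: ref w else ref w

-- index of the LAST occurrence of x
def lastOcc (x : Char) : List Char → Option Nat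
  | [] => none
  | c :: w =>
    match lastOcc x w with
    | some j => some (j + 1)
    | none => if c == x then some 0 else none

theorem sufMax_cons_step (c : Char) (w : List Char) :
    sufMax (c :: w) = if (sufMax w).all (fun b => b ≤ c) then some c else sufMax w := by
  cases h : sufMax w with
  | none => simp [sufMax, h]
  | some b =>
    by_cases hb : b ≤ c
    · simp [sufMax, h, hb, max_eq_left hb]
    · simp [sufMax, h, hb, max_eq_right (not_le.mp hb).le]

theorem sufMax_eq_none_iff (v : List Char) : sufMax v = none ↔ v = [] := by
  cases v with
  | nil => simp [sufMax]
  | cons c w => simp [sufMax]; cases h : sufMax w <;> simp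

theorem sufMax_mem {v : List Char} {b : Char} (h : sufMax v = some b) : b ∈ v := by
  induction v with
  | nil => simp [sufMax] at h
  | cons c w ih =>
    rw [sufMax_cons_step] at h
    split at h
    · simp at h; simp [h]
    · exact List.mem_cons_of_mem _ (ih h)

theorem sufMax_le : ∀ {v : List Char} {x b : Char}, x ∈ v → sufMax v = some b → x ≤ b := by
  intro v
  induction v with
  | nil => intro x b hx _; simp at hx
  | cons c w ih =>
    intro x b hx h
    cases hw : sufMax w with
    | none =>
      have hwnil := (sufMax_eq_none_iff w).mp hw
      subst hwnil
      simp [sufMax] at h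
      subst h
      simp at hx
      exact le_of_eq hx
    | some bw =>
      simp [sufMax, hw] at h
      subst h
      rcases List.mem_cons.mp hx with rfl | hxw
      · exact le_max_left _ _
      · exact le_trans (ih hxw hw) (le_max_right _ _)

theorem lastOcc_of_mem {x : Char} {v : List Char} (h : x ∈ v) : ∃ j, lastOcc x v = some j := by
  induction v with
  | nil => simp at h
  | cons c w ih =>
    rcases List.mem_cons.mp h with rfl | hw
    · cases hl : lastOcc x w with
      | none => exact ⟨0, by simp [lastOcc, hl]⟩
      | some j => exact ⟨j + 1, by simp [lastOcc, hl]⟩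
    · obtain ⟨j, hj⟩ := ih hw
      exact ⟨j + 1, by simp [lastOcc, hj]⟩

theorem lastOcc_eq_none_of_not_mem {x : Char} {v : List Char} (h : x ∉ v) : lastOcc x v = none := by
  induction v with
  | nil => rfl
  | cons c w ih =>
    simp at h
    simp [lastOcc, ih h.2, beq_iff_eq]
    exact fun hc => absurd hc.symm h.1

theorem lastOcc_lt_length {x : Char} : ∀ {v : List Char} {j : Nat}, lastOcc x v = some j →
    j < v.length := by
  intro v
  induction v with
  | nil => intro j h; simp [lastOcc] at h
  | cons c w ih =>
    intro j h
    cases hl : lastOcc x w with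
    | none =>
      simp [lastOcc, hl] at h
      simp [← h.2]
    | some j' =>
      simp [lastOcc, hl] at h
      subst h
      simpa using Nat.succ_lt_succ (ih hl)

theorem filter_eq_nil_of_not_mem {x : Char} {v : List Char} (h : x ∉ v) :
    v.filter (· == x) = [] := by
  rw [List.filter_eq_nil_iff]
  intro a ha hax
  exact h (by rwa [eq_of_beq hax] at ha)

-- the chunk structure of ref: one round of A produces all copies of the max, then recurses after the last one
theorem ref_chunk : ∀ (v : List Char) (b : Char) (j : Nat),
    sufMax v = some b → lastOcc b v = some j →
    ref v = v.filter (· == b) ++ ref (v.drop (j + 1)) := by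
  intro v
  induction v with
  | nil => intro b j h _; simp [sufMax] at h
  | cons c w ih =>
    intro b j hmax hlast
    rw [sufMax_cons_step] at hmax
    by_cases hall : (sufMax w).all (fun b => b ≤ c)
    · rw [if_pos hall] at hmax
      simp at hmax
      subst hmax
      by_cases hcw : c ∈ w
      · -- c occurs again later; sufMax w = c
        have hw : sufMax w = some c := by
          cases hw : sufMax w with
          | none =>
            have := (sufMax_eq_none_iff w).mp hw
            subst this; simp at hcw
          | some bw =>
            have h1 : c ≤ bw := sufMax_le hcw hw
            have h2 : bw ≤ c := by simpa [hw] using hall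
            rw [le_antisymm h2 h1]
        obtain ⟨j', hj'⟩ := lastOcc_of_mem hcw
        have hL : lastOcc c (c :: w) = some (j' + 1) := by simp [lastOcc, hj']
        rw [hL] at hlast
        simp at hlast
        subst hlast
        simp only [ref, if_pos hall, List.filter_cons, beq_self_eq_true, if_pos,
          List.drop_succ_cons]
        rw [ih c j' hw hj']
        simp
      · -- c is strictly the last max
        have hln : lastOcc c w = none := lastOcc_eq_none_of_not_mem hcw
        have hL : lastOcc c (c :: w) = some 0 := by simp [lastOcc, hln]
        rw [hL] at hlast
        simp at hlast
        subst hlast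
        simp [ref, if_pos hall, List.filter_cons, filter_eq_nil_of_not_mem hcw]
    · rw [if_neg hall] at hmax
      have hbw : sufMax w = some b := hmax
      have hbmem : b ∈ w := sufMax_mem hbw
      have hcb : ¬ b ≤ c := by
        intro hle; exact hall (by simp [hbw]; exact hle)
      have hcne : ¬ (c == b) := by
        simp only [beq_iff_eq]
        intro heq; exact hcb (le_of_eq heq.symm)
      obtain ⟨j', hj'⟩ := lastOcc_of_mem hbmem
      have hL : lastOcc b (c :: w) = some (j' + 1) := by simp [lastOcc, hj']
      rw [hL] at hlast
      simp at hlast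
      subst hlast
      simp only [ref, if_neg hall, List.filter_cons, List.drop_succ_cons]
      rw [if_neg (by simpa using hcne)]
      exact ih b j' hbw hj'

-- B's foldr shape computes (ref u).reverse together with sufMax u
theorem b_fold_char : ∀ (u : List Char),
    List.foldr (fun c (st : List Char × Option Char) =>
        if st.2.all (fun b => b ≤ c) then (st.1 ++ [c], some c) else st) ([], none) u
      = ((ref u).reverse, sufMax u) := by
  intro u
  induction u with
  | nil => rfl
  | cons c w ih =>
    simp only [List.foldr_cons, ih]
    by_cases hall : (sufMax w).all (fun b => b ≤ c)
    · rw [if_pos hall]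
      have hms : sufMax (c :: w) = some c := by rw [sufMax_cons_step, if_pos hall]
      simp [ref, if_pos hall, hms]
    · rw [if_neg hall]
      have hms : sufMax (c :: w) = sufMax w := by rw [sufMax_cons_step, if_neg hall]
      simp [ref, if_neg hall, hms]

theorem alt_eq_ref (s : String) (n : Int) :
    getSubSeq_alt s n = String.ofList (ref (s.toList.take n.toNat)) := by
  have h1 : PySem.List.slice s.toList none (some (max n 0)) = s.toList.take n.toNat := by
    rw [PySem.List.slice_to s.toList (le_max_right n 0)]
    congr 1; omega
  simp only [getSubSeq_alt, h1, List.foldl_reverse, b_fold_char, List.reverse_reverse]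

-- folding Python max over a list is sufMax
theorem foldl_max_sufMax : ∀ (w : List Char) (a : Char),
    List.foldl max a w = match sufMax w with | none => a | some b => max a b := by
  intro w
  induction w with
  | nil => intro a; rfl
  | cons c w ih =>
    intro a
    simp only [List.foldl_cons, ih]
    cases h : sufMax w with
    | none => simp [sufMax, h]
    | some b => simp [sufMax, h, max_assoc]

theorem sufMax_cons_foldl (c : Char) (w : List Char) :
    sufMax (c :: w) = some (List.foldl max c w) := by
  rw [foldl_max_sufMax]
  cases h : sufMax w <;> simp [sufMax, h]

-- lookups along [cr, n) are exactly the suffix v of the prefix u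
theorem lookup_eq {l : List Char} {n cr : Int} (h0 : 0 ≤ cr) (hn : n ≤ (l.length : Int))
    (j : Nat) (hj : (j : Int) < n - cr) :
    PySem.List.pyGetD l (cr + (j : Int)) ' ' = ((l.take n.toNat).drop cr.toNat).getD j ' ' := by
  have hcrn : cr.toNat + j < n.toNat := by omega
  have hlen : cr.toNat + j < l.length := by omega
  rw [PySem.List.pyGetD_eq_getElem l ' ' (by omega) (by push_cast; omega)]
  have ht : (cr + (j : Int)).toNat = cr.toNat + j := by omega
  rw [List.getD_eq_getElem?_getD, List.getElem?_drop, List.getElem?_take]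
  simp [ht, hcrn, hlen, List.getElem?_eq_getElem hlen]

-- A's inner fold: appends every occurrence of mx, records the index of the last one
theorem inner_fold (l : List Char) (mx : Char) :
    ∀ (v : List Char) (k : Int) (res : List Char) (t : Int),
    (∀ j : Nat, j < v.length → PySem.List.pyGetD l (k + (j : Int)) ' ' = v.getD j ' ') →
    (PySem.List.pyRange k (k + v.length) 1).foldl (aInner l mx) (res, t)
      = (res ++ v.filter (· == mx),
         match lastOcc mx v with | some j => k + (j : Int) | none => t) := by
  intro v
  induction v with
  | nil => intro k res t _; simp [PySem.List.pyRange_one_eq_nil, lastOcc]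
  | cons c w ih =>
    intro k res t H
    have hk : k < k + ((c :: w).length : Int) := by simp
    rw [PySem.List.pyRange_one_cons hk, List.foldl_cons]
    have hc : PySem.List.pyGetD l k ' ' = c := by
      have h0 := H 0 (by simp)
      simpa using h0
    have Hw : ∀ j : Nat, j < w.length →
        PySem.List.pyGetD l ((k + 1) + (j : Int)) ' ' = w.getD j ' ' := by
      intro j hj
      have hh := H (j + 1) (by simp only [List.length_cons]; omega)
      push_cast at hh
      rw [show (k + ((j : Int) + 1)) = (k + 1) + (j : Int) by ring] at hh
      simpa using hh
    have harith : k + ((c :: w).length : Int) = (k + 1) + (w.length : Int) := by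
      simp; ring
    rw [harith]
    by_cases hcm : (c == mx)
    · rw [show aInner l mx (res, t) k = (res ++ [c], k) from by simp [aInner, hc, hcm]]
      rw [ih (k + 1) (res ++ [c]) k Hw]
      simp only [List.filter_cons, hcm, if_pos]
      cases hl : lastOcc mx w with
      | none => simp [lastOcc, hl, hcm]
      | some j =>
        simp [lastOcc, hl, Prod.ext_iff]
        push_cast
        ring
    · rw [show aInner l mx (res, t) k = (res, t) from by simp [aInner, hc, hcm]]
      rw [ih (k + 1) res t Hw]
      simp only [List.filter_cons]
      rw [if_neg (by simpa using hcm)]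
      cases hl : lastOcc mx w with
      | none => simp [lastOcc, hl, hcm]
      | some j =>
        simp [lastOcc, hl, Prod.ext_iff]
        push_cast
        ring

-- A's mx is the suffix max of v
theorem aMx_eq {l : List Char} {n cr : Int} (h0 : 0 ≤ cr) (hcr : cr < n)
    (hn : n ≤ (l.length : Int)) :
    sufMax ((l.take n.toNat).drop cr.toNat) = some (aMx l n cr) := by
  have hv : (l.take n.toNat).drop cr.toNat ≠ [] := by
    have : ((l.take n.toNat).drop cr.toNat).length = n.toNat - cr.toNat := by
      simp; omega
    intro hnil; rw [hnil] at this; simp at this; omega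
  obtain ⟨c, w, hcw⟩ := List.exists_cons_of_ne_nil hv
  rw [hcw, sufMax_cons_foldl]
  unfold aMx
  congr 1
  -- head: s[cr] = c
  have hc : PySem.List.pyGetD l cr ' ' = c := by
    have := lookup_eq h0 hn 0 (by omega)
    simp [hcw] at this; simpa using this
  -- tail: the fold over range(cr+1, n) is the fold over w
  have hw : (PySem.List.pyRange (cr + 1) n 1).map (fun i => PySem.List.pyGetD l i ' ') = w := by
    have hlenw : (w.length : Int) = n - cr - 1 := by
      have : ((l.take n.toNat).drop cr.toNat).length = n.toNat - cr.toNat := by simp; omega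
      rw [hcw] at this; simp at this; omega
    apply List.ext_getElem
    · simp [PySem.List.length_pyRange_one]; omega
    · intro i h1 h2
      rw [List.getElem_map, PySem.List.getElem_pyRange_one]
      have := lookup_eq h0 hn (i + 1) (by push_cast; omega)
      rw [hcw] at this
      rw [show cr + 1 + (i : Int) = cr + ((i:Nat) + 1 : Nat) by push_cast; ring]
      rw [this]
      simp [List.getD_eq_getElem?_getD, List.getElem?_eq_getElem h2]
  symm
  calc (PySem.List.pyRange (cr + 1) n 1).foldl
          (fun mx i => max mx (PySem.List.pyGetD l i ' ')) (PySem.List.pyGetD l cr ' ')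
      = w.foldl max c := by
        rw [hc, ← hw, List.foldl_map]

-- the main loop invariant
theorem loop_ref {l : List Char} {n : Int} (hn : n ≤ (l.length : Int)) :
    ∀ (fuel : Nat) (cr : Int) (res : List Char), 0 ≤ cr → (n - cr).toNat ≤ fuel →
    aLoop l n fuel cr res = res ++ ref ((l.take n.toNat).drop cr.toNat) := by
  intro fuel
  induction fuel with
  | zero =>
    intro cr res h0 hf
    have : (l.take n.toNat).drop cr.toNat = [] := by
      apply List.drop_eq_nil_of_le; simp; omega
    simp [aLoop, this, ref]
  | succ fuel ih =>
    intro cr res h0 hf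
    by_cases hcr : cr < n
    · set v := (l.take n.toNat).drop cr.toNat with hv
      have hvlen : (v.length : Int) = n - cr := by simp [hv]; omega
      have hmx := aMx_eq h0 hcr hn
      set mx := aMx l n cr with hmxdef
      obtain ⟨j, hj⟩ := lastOcc_of_mem (sufMax_mem hmx)
      have hjlt : j < v.length := lastOcc_lt_length hj
      have hrange : n = cr + (v.length : Int) := by omega
      have hfold := inner_fold l mx v cr res cr
        (fun j hjv => lookup_eq h0 hn j (by omega))
      rw [← hrange] at hfold
      rw [hj] at hfold
      simp only [aLoop, if_pos hcr, ← hmxdef]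
      rw [hfold]
      have hdrop : (l.take n.toNat).drop (cr + (j : Int) + 1).toNat = v.drop (j + 1) := by
        rw [show (cr + (j : Int) + 1).toNat = cr.toNat + (j + 1) by omega]
        rw [← List.drop_drop, ← hv]
      have hnext := ih (cr + (j : Int) + 1) (res ++ v.filter (· == mx)) (by omega)
        (by omega)
      rw [hdrop] at hnext
      rw [hnext, ref_chunk v mx j hmx hj, ← List.append_assoc]
    · have : (l.take n.toNat).drop cr.toNat = [] := by
        apply List.drop_eq_nil_of_le; simp; omega
      simp [aLoop, if_neg hcr, this, ref]

-- ===== VERDICT (by name: the statement is the Claim_ definition above) =====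
theorem getSubSeq_spec : Claim_equal_getSubSeq := by
  intro s n _ hpre
  unfold Spec_getSubSeq getSubSeq
  rw [alt_eq_ref]
  rw [loop_ref hpre (n.toNat + 1) 0 [] le_rfl (by omega)]
  simp
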